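-- pv_equiv track=rewrite | github.com/Zyrexam/Smart-Contract-Pipeline-1 | Results/llm_comparison/run_exp.py | select_dataset_items
-- ===== SOURCE A (Python) =====
-- def select_dataset_items(dataset: list[dict], limit: int | None, indexes: list[int] | None) -> list[dict]:
--     if indexes:
--         selected_items = []
--         seen = set()
--
--         for index in indexes:
--             dataset_pos = index - 1
--             if dataset_pos >= len(dataset):
--                 raise ValueError(
--                     f"Dataset index {index} is out of range. Dataset contains {len(dataset)} items."
--                 )
--             if index in seen:
--                 continue
--             selected_items.append(dataset[dataset_pos])
--             seen.add(index)
--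
--         return selected_items
--
--     if limit:
--         return dataset[:limit]
--
--     return dataset
-- ===== SOURCE B (Python) =====
-- def select_dataset_items(dataset: list[dict], limit: int | None, indexes: list[int] | None) -> list[dict]:
--     if indexes:
--         selected_items = []
--         remaining = list(indexes)
--         while remaining:
--             index = remaining[0]
--             if index - 1 >= len(dataset):
--                 raise ValueError(
--                     f"Dataset index {index} is out of range. Dataset contains {len(dataset)} items."
--                 )
--             selected_items.append(dataset[index - 1])
--             remaining = [j for j in remaining[1:] if j != index]
--         return selected_items
--
--     if limit:
--         return dataset[:limit]
--
--     return dataset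
-- ===== Notes on version B (the rewrite author's own statement) =====
-- stated objective: alternative
-- what changed: B drops A's seen-set entirely: instead of accumulating a set of seen indexes and skipping them, B consumes a worklist and, after selecting the head index, filters every later occurrence of that index out of the worklist (nub-by-filter); it trades A's O(m) set lookups for quadratic filtering on duplicate-heavy index lists.
import Mathlib
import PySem

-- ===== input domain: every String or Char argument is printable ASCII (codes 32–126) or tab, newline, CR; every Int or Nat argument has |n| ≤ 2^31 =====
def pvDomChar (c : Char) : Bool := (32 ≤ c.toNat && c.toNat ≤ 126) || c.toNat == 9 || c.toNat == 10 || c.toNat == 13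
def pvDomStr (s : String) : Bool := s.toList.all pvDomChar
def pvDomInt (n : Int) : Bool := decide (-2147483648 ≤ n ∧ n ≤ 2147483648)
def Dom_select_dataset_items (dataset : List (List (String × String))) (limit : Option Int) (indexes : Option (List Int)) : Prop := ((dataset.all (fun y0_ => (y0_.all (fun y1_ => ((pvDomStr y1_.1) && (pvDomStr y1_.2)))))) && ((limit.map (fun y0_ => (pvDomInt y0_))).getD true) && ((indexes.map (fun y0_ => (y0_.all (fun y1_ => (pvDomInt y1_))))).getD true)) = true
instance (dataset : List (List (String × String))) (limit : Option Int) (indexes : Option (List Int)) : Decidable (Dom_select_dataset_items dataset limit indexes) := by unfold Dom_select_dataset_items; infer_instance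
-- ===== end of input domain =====

-- B replaces A's seen-set dedup loop by a worklist that filters out later duplicates of the
-- index just consumed (classic nub-by-filter); objective: alternative (no auxiliary set,
-- at the price of quadratic filtering on duplicate-heavy index lists).

-- ===== PORT A =====

-- A's loop: selected_items / seen accumulated together; the 'raise' branch returns the
-- accumulator (unreachable under Pre_), dataset[pos] via pyGet? with a dummy default likewise.
def pvGoA (dataset : List (List (String × String))) : List Int → List (List (String × String)) → PySem.Set Int → List (List (String × String))
  | [], sel, _ => sel
  | i :: rest, sel, seen =>
      if (dataset.length : Int) ≤ i - 1 then sel  -- Python: raise ValueError (excluded by Pre_)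
      else if PySem.Set.contains seen i then pvGoA dataset rest sel seen
      else pvGoA dataset rest (sel ++ [(PySem.List.pyGet? dataset (i - 1)).getD []]) (PySem.Set.add seen i)

def select_dataset_items (dataset : List (List (String × String))) (limit : Option Int) (indexes : Option (List Int)) : List (List (String × String)) :=
  match indexes with
  | some (i :: rest) => pvGoA dataset (i :: rest) [] PySem.Set.empty
  | _ =>  -- 'if limit: return dataset[:limit]; return dataset'
    match limit with
    | some l => if l ≠ 0 then PySem.List.slice dataset none (some l) else dataset
    | none => dataset

-- ===== PORT B =====

-- B's while loop: consume the head of the worklist, append its item, and drop every later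
-- occurrence of that index from the worklist ('remaining = [j for j in remaining[1:] if j != index]').
def pvPickB (dataset : List (List (String × String))) : List Int → List (List (String × String)) → List (List (String × String))
  | [], sel => sel
  | i :: rest, sel =>
      if (dataset.length : Int) ≤ i - 1 then sel  -- Python: raise ValueError (excluded by Pre_)
      else pvPickB dataset (rest.filter (fun j => !(j == i)))
             (sel ++ [(PySem.List.pyGet? dataset (i - 1)).getD []])
  termination_by l _ => l.length
  decreasing_by
    refine Nat.lt_succ_of_le ?_
    calc (List.filter _ rest.attach).unattach.length ≤ rest.attach.length := by
          rw [List.length_unattach]; exact List.length_filter_le _ _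
      _ = rest.length := List.length_attach ..

-- B's limit tail, same Python code as A's fallthrough: 'if limit: return dataset[:limit]; return dataset'
def pvTailB (dataset : List (List (String × String))) : Option Int → List (List (String × String))
  | some l => if l ≠ 0 then PySem.List.slice dataset none (some l) else dataset
  | none => dataset

def select_dataset_items_alt (dataset : List (List (String × String))) (limit : Option Int) (indexes : Option (List Int)) : List (List (String × String)) :=
  match indexes with
  | none => pvTailB dataset limit
  | some [] => pvTailB dataset limit
  | some (i :: rest) => pvPickB dataset (i :: rest) []

-- ===== PRECONDITION & SPEC =====
-- Pre_ excludes exactly the inputs where A raises: an index with index-1 ≥ len(dataset)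
-- (ValueError) or index-1 < -len(dataset) (IndexError on dataset[index-1]).
def Pre_select_dataset_items (dataset : List (List (String × String))) (limit : Option Int) (indexes : Option (List Int)) : Prop :=
  ∀ j ∈ indexes.getD [], j - 1 < (dataset.length : Int) ∧ -(dataset.length : Int) ≤ j - 1
instance (dataset : List (List (String × String))) (limit : Option Int) (indexes : Option (List Int)) : Decidable (Pre_select_dataset_items dataset limit indexes) := by unfold Pre_select_dataset_items; infer_instance

def pvWitness_select_dataset_items : (List (List (String × String))) × Option Int × Option (List Int) :=
  ([[("k", "a")], [("k", "b")], [("k", "c")]], none, some [1, 3, 3, 0])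

def Spec_select_dataset_items (dataset : List (List (String × String))) (limit : Option Int) (indexes : Option (List Int)) (out : List (List (String × String))) : Prop := out = select_dataset_items_alt dataset limit indexes
instance (dataset : List (List (String × String))) (limit : Option Int) (indexes : Option (List Int)) (out : List (List (String × String))) : Decidable (Spec_select_dataset_items dataset limit indexes out) := by unfold Spec_select_dataset_items; infer_instance

-- ===== CLAIM (what is proved, stated in full; the proofs are below) =====
def Claim_equal_select_dataset_items : Prop := ∀ (dataset : List (List (String × String))) (limit : Option Int) (indexes : Option (List Int)), Dom_select_dataset_items dataset limit indexes → Pre_select_dataset_items dataset limit indexes → Spec_select_dataset_items dataset limit indexes (select_dataset_items dataset limit indexes)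

-- ===== LEMMAS AND PROOFS =====

lemma pvPickB_nil (dataset : List (List (String × String))) (sel : List (List (String × String))) :
    pvPickB dataset [] sel = sel := by
  unfold pvPickB
  rfl

lemma pvPickB_cons (dataset : List (List (String × String))) (i : Int) (rest : List Int)
    (sel : List (List (String × String))) (h : i - 1 < (dataset.length : Int)) :
    pvPickB dataset (i :: rest) sel
      = pvPickB dataset (rest.filter (fun j => !(j == i)))
          (sel ++ [(PySem.List.pyGet? dataset (i - 1)).getD []]) := by
  conv_lhs => unfold pvPickB
  rw [if_neg (by omega)]

-- A's seen-set loop equals B's worklist loop on the worklist purged of already-seen indexes: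
-- skipping members of 'seen' (A) and pre-filtering them away (B) visit the same indexes in order.
lemma pvGoA_eq_pickB (dataset : List (List (String × String))) (l : List Int)
    (h : ∀ j ∈ l, j - 1 < (dataset.length : Int)) (sel : List (List (String × String))) (seen : PySem.Set Int) :
    pvGoA dataset l sel seen
      = pvPickB dataset (l.filter (fun j => !(PySem.Set.contains seen j))) sel := by
  induction l generalizing sel seen with
  | nil => rw [pvGoA, List.filter_nil, pvPickB_nil]
  | cons i rest ih =>
      have hi := h i (by simp)
      have hrest : ∀ j ∈ rest, j - 1 < (dataset.length : Int) := fun j hj => h j (by simp [hj])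
      simp only [pvGoA]
      rw [if_neg (by omega)]
      by_cases hc : PySem.Set.contains seen i = true
      · have hc' : i ∈ seen := by simpa [PySem.Set.contains] using hc
        rw [if_pos hc, ih hrest]
        have hsk : (i :: rest).filter (fun j => !(PySem.Set.contains seen j))
            = rest.filter (fun j => !(PySem.Set.contains seen j)) := by
          simp [hc']
        rw [hsk]
      · have hc' : i ∉ seen := by simpa [PySem.Set.contains] using hc
        rw [if_neg hc, ih hrest]
        have hadd : PySem.Set.add seen i = seen ++ [i] := by
          unfold PySem.Set.add; rw [if_neg hc]
        rw [hadd]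
        have hfil : rest.filter (fun j => !(PySem.Set.contains (seen ++ [i]) j))
            = (rest.filter (fun j => !(PySem.Set.contains seen j))).filter (fun j => !(j == i)) := by
          rw [List.filter_filter]
          apply List.filter_congr
          intro j _
          by_cases hji : j = i <;> by_cases hjs : PySem.Set.contains seen j = true <;>
            simp_all [PySem.Set.contains]
        rw [hfil]
        have hkeep : (i :: rest).filter (fun j => !(PySem.Set.contains seen j))
            = i :: rest.filter (fun j => !(PySem.Set.contains seen j)) := by
          simp [hc']
        rw [hkeep, pvPickB_cons _ _ _ _ hi]

-- ===== VERDICT (by name: the statement is the Claim_ definition above) =====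
theorem select_dataset_items_spec : Claim_equal_select_dataset_items := by
  intro dataset limit indexes _ hpre
  unfold Spec_select_dataset_items select_dataset_items select_dataset_items_alt
  cases indexes with
  | none => rfl
  | some idxs =>
    cases idxs with
    | nil => rfl
    | cons i rest =>
      unfold Pre_select_dataset_items at hpre
      simp only [Option.getD] at hpre
      have hlt : ∀ j ∈ (i :: rest), j - 1 < (dataset.length : Int) := fun j hj => (hpre j hj).1
      show pvGoA dataset (i :: rest) [] PySem.Set.empty = pvPickB dataset (i :: rest) []
      rw [pvGoA_eq_pickB dataset (i :: rest) hlt [] PySem.Set.empty]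
      congr 1
      simp [PySem.Set.empty, PySem.Set.contains]
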